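-- pv_equiv track=rewrite | github.com/argilo/secplus | secplus_v2_reciv.py | demanchester
-- ===== SOURCE A (Python) =====
-- def demanchester(st):
--     x = 1
--     b = []
--     slen = len(st)
--
--     # Note that since 1 starts as "1"
--     # we are testing the 2nd bit for '1' or '0'
--     while x < slen:
--         if st[x] == st[x-1] :
--             break
--             # x += 1
--             # continue
--         if st[x] == "1":
--             b.append("1")
--         else:
--             b.append("0")
--         x = x + 2
--
--     return "".join(b)
-- ===== SOURCE B (Python) =====
-- def demanchester(st):
--     first = st[::2]
--     second = st[1::2]
--     n = next((i for i, p in enumerate(zip(first, second)) if p[0] == p[1]), len(second))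
--     return ''.join('1' if c == '1' else '0' for c in second[:n])
-- ===== Notes on version B (the rewrite author's own statement) =====
-- stated objective: idiomatic
-- what changed: Replaces the indexed while-loop with break by de-interleaving the string into the two half-streams st[::2] and st[1::2], locating the first index where they agree, and mapping the second half up to that point.
import Mathlib
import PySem

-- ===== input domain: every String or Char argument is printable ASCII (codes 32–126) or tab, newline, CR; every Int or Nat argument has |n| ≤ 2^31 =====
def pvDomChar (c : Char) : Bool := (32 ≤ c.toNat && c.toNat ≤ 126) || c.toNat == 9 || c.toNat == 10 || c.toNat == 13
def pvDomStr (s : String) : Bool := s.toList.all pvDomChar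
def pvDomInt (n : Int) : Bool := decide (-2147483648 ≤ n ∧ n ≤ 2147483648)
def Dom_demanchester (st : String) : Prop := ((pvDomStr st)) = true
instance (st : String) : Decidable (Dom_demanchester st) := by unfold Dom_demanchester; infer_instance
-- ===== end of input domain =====

-- B replaces A's indexed while-loop with de-interleaved half streams (st[::2], st[1::2]):
-- it finds the first position where the two halves agree, then maps the second half up to
-- that point — objective: idiomatic (no speed claim).

-- ===== PORT A =====
-- A's while-loop: x steps by 2, breaks when st[x] == st[x-1], appends '1'/'0' from st[x].
def demanGo (cs : List Char) (slen : Int) (x : Int) (b : List String) : List String :=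
  if _h : x < slen then
    match PySem.List.pyGet? cs x, PySem.List.pyGet? cs (x - 1) with
    | some c, some p =>
      if c == p then b
      else demanGo cs slen (x + 2) (b ++ [if c == '1' then "1" else "0"])
    | _, _ => b  -- unreachable when slen = cs.length and 1 ≤ x
  else b
termination_by (slen - x).toNat
decreasing_by omega

def demanchester (st : String) : String :=
  PySem.Str.join "" (demanGo st.toList (PySem.Str.len st) 1 [])

-- ===== PORT B =====
-- hand port of the step-2 slice s[::2] (every other element, starting at the first); exact
def stride2 {α : Type} : List α → List α
  | [] => []
  | [c] => [c]
  | c :: _ :: rest => c :: stride2 rest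

def demanchester_alt (st : String) : String :=
  let first := stride2 st.toList                 -- st[::2]
  let second := stride2 (st.toList.drop 1)       -- st[1::2] = drop 1, then every other
  -- next((i for i, p in enumerate(zip(first, second)) if p[0] == p[1]), len(second))
  let n := ((first.zip second).findIdx? (fun p => p.1 == p.2)).getD second.length
  -- ''.join('1' if c == '1' else '0' for c in second[:n]); second[:n] with n : Nat = take
  PySem.Str.join "" ((second.take n).map (fun c => if c == '1' then "1" else "0"))

-- ===== PRECONDITION & SPEC =====
def Spec_demanchester (st : String) (out : String) : Prop := out = demanchester_alt st
instance (st : String) (out : String) : Decidable (Spec_demanchester st out) := by unfold Spec_demanchester; infer_instance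

-- ===== CLAIM (what is proved, stated in full; the proofs are below) =====
def Claim_equal_demanchester : Prop := ∀ (st : String), Dom_demanchester st → Spec_demanchester st (demanchester st)

-- ===== LEMMAS AND PROOFS =====

-- the common characterisation: output pieces read off char pairs two at a time
def pairsOut : List Char → List String
  | a :: c :: rest => if c == a then [] else (if c == '1' then "1" else "0") :: pairsOut rest
  | _ => []

lemma stride2_cons {α : Type} (c : α) (rest : List α) :
    stride2 (c :: rest) = c :: stride2 (rest.drop 1) := by
  cases rest <;> simp [stride2]

-- A's loop, started at index pre.length + 1 with accumulator b, emits pairsOut of the tail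
lemma demanGo_eq : ∀ (tail pre : List Char) (b : List String),
    demanGo (pre ++ tail) (pre ++ tail).length ((pre.length : Int) + 1) b = b ++ pairsOut tail
  | [], pre, b => by
    rw [demanGo]
    simp [pairsOut]
  | [a], pre, b => by
    rw [demanGo]
    simp [pairsOut]
  | a :: c :: rest, pre, b => by
    rw [demanGo]
    have hlt : ((pre.length : Int) + 1) < ((pre ++ a :: c :: rest).length : Int) := by
      simp
    rw [dif_pos hlt]
    have h1 : PySem.List.pyGet? (pre ++ a :: c :: rest) ((pre.length : Int) + 1) = some c := by
      have : pre ++ a :: c :: rest = (pre ++ [a]) ++ c :: rest := by simp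
      rw [this]
      have := PySem.List.pyGet?_append_length (pre ++ [a]) rest c
      simpa using this
    have h0 : PySem.List.pyGet? (pre ++ a :: c :: rest) ((pre.length : Int) + 1 - 1) = some a := by
      have : (pre.length : Int) + 1 - 1 = (pre.length : Int) := by ring
      rw [this]
      exact PySem.List.pyGet?_append_length pre (c :: rest) a
    rw [h1, h0]
    by_cases hac : c = a
    · simp [pairsOut, hac]
    · have hbe : (c == a) = false := by simp [hac]
      simp only [hbe]
      have hassoc : pre ++ a :: c :: rest = (pre ++ [a, c]) ++ rest := by simp
      have hx : (pre.length : Int) + 1 + 2 = ((pre ++ [a, c]).length : Int) + 1 := by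
        simp; ring
      rw [hassoc, hx, demanGo_eq rest (pre ++ [a, c]) (b ++ [if c == '1' then "1" else "0"])]
      simp [pairsOut, hbe]
termination_by tail _ _ => tail.length

-- B's pipeline computes the same pieces
lemma alt_pieces_eq : ∀ (cs : List Char),
    (((stride2 (cs.drop 1)).take
        (((stride2 cs).zip (stride2 (cs.drop 1))).findIdx? (fun p => p.1 == p.2)
          |>.getD (stride2 (cs.drop 1)).length)).map
      (fun c => if c == '1' then "1" else "0")) = pairsOut cs
  | [] => by simp [stride2, pairsOut]
  | [a] => by simp [stride2, pairsOut]
  | a :: c :: rest => by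
    have hfst : stride2 (a :: c :: rest) = a :: stride2 rest := by simp [stride2]
    have hsnd : stride2 ((a :: c :: rest).drop 1) = c :: stride2 (rest.drop 1) := by
      simpa using stride2_cons c rest
    rw [hfst, hsnd]
    by_cases hac : c = a
    · subst hac
      simp [List.findIdx?_cons, pairsOut]
    · have hbe : (a == c) = false := by simp [Ne.symm hac]
      have hbe' : (c == a) = false := by simp [hac]
      simp only [List.zip_cons_cons, List.findIdx?_cons, hbe]
      cases ho : ((stride2 rest).zip (stride2 (rest.drop 1))).findIdx? (fun p => p.1 == p.2) with
      | none =>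
        have ih := alt_pieces_eq rest
        rw [ho] at ih
        simp at ih
        simpa [pairsOut, hbe', List.map_take] using ih
      | some k =>
        have ih := alt_pieces_eq rest
        rw [ho] at ih
        simp at ih
        simpa [pairsOut, hbe', List.map_take] using ih
termination_by cs => cs.length

-- ===== VERDICT (by name: the statement is the Claim_ definition above) =====
theorem demanchester_spec : Claim_equal_demanchester := by
  intro st _
  unfold Spec_demanchester
  have hA : demanGo st.toList (PySem.Str.len st) 1 [] = pairsOut st.toList := by
    have := demanGo_eq st.toList [] []
    simpa [PySem.Str.len] using this
  simp only [demanchester, demanchester_alt, hA, alt_pieces_eq st.toList]
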